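-- pv_equiv track=rewrite | github.com/EOSArgentina/firestarter | lib/utils.py | string_to_name
-- ===== SOURCE A (Python) =====
-- def char_to_symbol(c):
--   if( c >= 'a' and c <= 'z' ):
--     return (ord(c) - ord('a')) + 6;
--   if( c >= '1' and c <= '5' ):
--     return (ord(c) - ord('1')) + 1;
--   return 0;
--
-- def string_to_name(s):
--   name = 0;
--   i = 0;
--   while i < len(s) and i < 12:
--     name |= (char_to_symbol(s[i]) & 0x1f) << (64 - 5 * (i + 1));
--     i+=1
--
--   if (len(s)==13):
--     name |= char_to_symbol(s[12]) & 0x0F;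
--   return name;
-- ===== SOURCE B (Python) =====
-- def char_to_symbol(c):
--   if 'a' <= c <= 'z':
--     return ord(c) - ord('a') + 6
--   if '1' <= c <= '5':
--     return ord(c) - ord('1') + 1
--   return 0
--
-- _B32 = '0123456789abcdefghijklmnopqrstuv'
--
-- def string_to_name(s):
--   # stage 1: transcribe the first 12 chars into base-32 digit characters,
--   # right-padded with '0' (symbol 0) to exactly 12 digits
--   digits = ''.join(_B32[char_to_symbol(c)] for c in s[:12]).ljust(12, '0')
--   # stage 2: parse the digit string as one base-32 number; *16 leaves room
--   # for the 4-bit tail, added arithmetically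
--   value = int(digits, 32) * 16
--   if len(s) == 13:
--     value += char_to_symbol(s[12]) & 0x0F
--   return value
-- ===== Notes on version B (the rewrite author's own statement) =====
-- stated objective: alternative
-- what changed: B first transcribes the first 12 characters into a right-padded 12-digit base-32 string and then parses it with int(digits, 32), adding the optional 4-bit 13th symbol arithmetically, instead of A's single pass that ORs each 5-bit symbol into its fixed bit position with per-index shifts.
import Mathlib
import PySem

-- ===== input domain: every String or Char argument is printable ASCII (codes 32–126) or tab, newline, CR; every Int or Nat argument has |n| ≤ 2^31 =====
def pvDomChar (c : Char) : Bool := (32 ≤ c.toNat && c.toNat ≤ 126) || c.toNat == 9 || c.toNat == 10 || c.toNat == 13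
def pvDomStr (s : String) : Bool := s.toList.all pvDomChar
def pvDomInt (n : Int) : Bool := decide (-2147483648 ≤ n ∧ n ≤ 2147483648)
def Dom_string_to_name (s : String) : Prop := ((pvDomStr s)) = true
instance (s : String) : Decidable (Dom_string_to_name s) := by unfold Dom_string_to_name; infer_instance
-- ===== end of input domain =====

-- B builds a right-padded 12-digit base-32 string and parses it (two staged passes,
-- arithmetic), instead of A's bit-OR packing at per-index shift positions (same cost).

-- ===== PORT A =====
def charToSymbolA (c : Char) : Int :=
  if 'a' ≤ c ∧ c ≤ 'z' then (c.toNat : Int) - ('a'.toNat : Int) + 6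
  else if '1' ≤ c ∧ c ≤ '5' then (c.toNat : Int) - ('1'.toNat : Int) + 1
  else 0

-- A's while loop: i counts up, name ORs in each symbol at its fixed bit position.
-- cs[i] is in range whenever the loop body runs (i < cs.length), so pyGetD is exact.
def stnWhile (cs : List Char) (i : Nat) (name : Int) : Int :=
  if h : i < cs.length ∧ i < 12 then
    stnWhile cs (i + 1)
      (PySem.Int.bor name
        ((PySem.Int.band (charToSymbolA (PySem.List.pyGetD cs (i : Int) ' ')) 0x1f) <<< (64 - 5 * (i + 1))))
  else name
termination_by 12 - i
decreasing_by omega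

def string_to_name (s : String) : Int :=
  let name := stnWhile s.toList 0 0
  if PySem.Str.len s = 13 then
    PySem.Int.bor name (PySem.Int.band (charToSymbolA (PySem.List.pyGetD s.toList (12 : Int) ' ')) 0x0F)
  else name

-- ===== PORT B =====
def charToSymbolB (c : Char) : Int :=
  if 'a' ≤ c ∧ c ≤ 'z' then (c.toNat : Int) - ('a'.toNat : Int) + 6
  else if '1' ≤ c ∧ c ≤ '5' then (c.toNat : Int) - ('1'.toNat : Int) + 1
  else 0

def b32chars : List Char := "0123456789abcdefghijklmnopqrstuv".toList

-- _B32[char_to_symbol(c)]; pyGet? is exact (0 ≤ char_to_symbol(c) < 32, always in range)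
def encDigit (c : Char) : Char :=
  (PySem.List.pyGet? b32chars (charToSymbolB c)).getD ' '

-- digit value of one base-32 digit char, exact on the chars 0-9a-v that B produces
def b32val (c : Char) : Int :=
  if '0' ≤ c ∧ c ≤ '9' then (c.toNat : Int) - 48 else (c.toNat : Int) - 87

-- int(digits, 32): Horner fold over the digit characters (exact on B's digit set)
def parseB32 (digits : List Char) : Int :=
  digits.foldl (fun a c => a * 32 + b32val c) 0

def string_to_name_alt (s : String) : Int :=
  let mapped := (PySem.List.slice s.toList none (some (12 : Int))).map encDigit
  let digits := mapped ++ List.replicate (12 - mapped.length) '0'   -- .ljust(12, '0')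
  let value := parseB32 digits * 16
  if PySem.Str.len s = 13 then
    value + PySem.Int.band (charToSymbolB (PySem.List.pyGetD s.toList (12 : Int) ' ')) 0x0F
  else value

-- ===== PRECONDITION & SPEC =====
def Spec_string_to_name (s : String) (out : Int) : Prop := out = string_to_name_alt s
instance (s : String) (out : Int) : Decidable (Spec_string_to_name s out) := by unfold Spec_string_to_name; infer_instance

-- ===== CLAIM (what is proved, stated in full; the proofs are below) =====
def Claim_equal_string_to_name : Prop := ∀ (s : String), Dom_string_to_name s → Spec_string_to_name s (string_to_name s)

-- ===== LEMMAS AND PROOFS =====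

-- the symbol value of position k, as a Nat (0 when k is past the end of the string)
def symN (cs : List Char) (k : Nat) : Nat :=
  if k < cs.length then (charToSymbolA (PySem.List.pyGetD cs (k : Int) ' ')).toNat else 0

-- the canonical value both computations produce from position i on (before the *16 / <<4)
def tailB (cs : List Char) (i : Nat) : Nat :=
  if i < 12 then symN cs i * 2 ^ (5 * (11 - i)) + tailB cs (i + 1) else 0
termination_by 12 - i

-- encode a Nat symbol value as its base-32 digit char
def encN (v : Nat) : Char := (PySem.List.pyGet? b32chars ((v : Nat) : Int)).getD ' '

lemma csym_bounds (c : Char) : 0 ≤ charToSymbolA c ∧ charToSymbolA c < 32 := by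
  unfold charToSymbolA
  split_ifs with h1 h2
  · obtain ⟨ha, hz⟩ := h1
    have ha' : 'a'.toNat ≤ c.toNat := ha
    have hz' : c.toNat ≤ 'z'.toNat := hz
    have e1 : 'a'.toNat = 97 := rfl
    have e2 : 'z'.toNat = 122 := rfl
    omega
  · obtain ⟨ha, hz⟩ := h2
    have ha' : '1'.toNat ≤ c.toNat := ha
    have hz' : c.toNat ≤ '5'.toNat := hz
    have e1 : '1'.toNat = 49 := rfl
    have e2 : '5'.toNat = 53 := rfl
    omega
  · omega

lemma csymB_eq (c : Char) : charToSymbolB c = charToSymbolA c := rfl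

lemma symN_lt (cs : List Char) (k : Nat) : symN cs k < 32 := by
  unfold symN
  split
  · have := csym_bounds (PySem.List.pyGetD cs (k : Int) ' ')
    omega
  · omega

lemma symN_cast (cs : List Char) (k : Nat) (h : k < cs.length) :
    (symN cs k : Int) = charToSymbolA (PySem.List.pyGetD cs (k : Int) ' ') := by
  unfold symN
  rw [if_pos h, Int.toNat_of_nonneg (csym_bounds _).1]

lemma band31_eq (v : Int) (h0 : 0 ≤ v) (h32 : v < 32) : PySem.Int.band v 31 = v := by
  rw [PySem.Int.band_of_nonneg h0 (by norm_num)]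
  have h31 : (31 : Int).toNat = 31 := rfl
  rw [h31]
  have hm := Nat.and_two_pow_sub_one_eq_mod v.toNat 5
  norm_num at hm
  rw [hm, Nat.mod_eq_of_lt (by omega)]
  omega

lemma band15_bounds (v : Int) (h0 : 0 ≤ v) :
    0 ≤ PySem.Int.band v 15 ∧ PySem.Int.band v 15 < 16 := by
  rw [PySem.Int.band_of_nonneg h0 (by norm_num)]
  have h15 : (15 : Int).toNat = 15 := rfl
  rw [h15]
  have := Nat.and_le_right (n := v.toNat) (m := 15)
  constructor
  · positivity
  · exact_mod_cast Nat.lt_of_le_of_lt this (by norm_num)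

lemma bor_add (X b K : Nat) (hb : b < 2 ^ K) :
    PySem.Int.bor ((X : Int) * 2 ^ K) (b : Int) = ((X * 2 ^ K + b : Nat) : Int) := by
  have h1 : ((X : Int) * 2 ^ K) = ((X * 2 ^ K : Nat) : Int) := by push_cast; ring
  rw [h1, PySem.Int.bor_natCast]
  congr 1
  rw [← Nat.shiftLeft_eq, ← Nat.shiftLeft_add_eq_or_of_lt hb X, Nat.shiftLeft_eq]

lemma tailB_stop (cs : List Char) : ∀ (d i : Nat), cs.length ≤ i → 12 ≤ i + d → tailB cs i = 0 := by
  intro d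
  induction d with
  | zero =>
    intro i _ h12
    rw [tailB, if_neg (by omega)]
  | succ d ih =>
    intro i hlen h12
    rw [tailB]
    split
    · have hs : symN cs i = 0 := by unfold symN; rw [if_neg (by omega)]
      rw [hs, ih (i + 1) (by omega) (by omega)]
      simp
    · rfl

-- invariant of A's while loop
lemma stnWhile_eq (cs : List Char) :
    ∀ (d i X : Nat), 12 ≤ i + d → i ≤ 12 →
      stnWhile cs i ((X : Int) * 2 ^ (64 - 5 * i)) =
        ((X * 2 ^ (64 - 5 * i) + tailB cs i * 16 : Nat) : Int) := by
  intro d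
  induction d with
  | zero =>
    intro i X h h12
    have hi : i = 12 := by omega
    subst hi
    rw [stnWhile, dif_neg (by omega), tailB, if_neg (by omega)]
    push_cast; ring
  | succ d ih =>
    intro i X h h12
    rw [stnWhile]
    by_cases hc : i < cs.length ∧ i < 12
    · rw [dif_pos hc]
      obtain ⟨hlen, hi12⟩ := hc
      have hb := csym_bounds (PySem.List.pyGetD cs (i : Int) ' ')
      rw [band31_eq _ hb.1 hb.2, ← symN_cast cs i hlen, Int.shiftLeft_eq]
      have hsh : ((symN cs i : Int)) * 2 ^ (64 - 5 * (i + 1))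
          = ((symN cs i * 2 ^ (64 - 5 * (i + 1)) : Nat) : Int) := by push_cast; ring
      rw [hsh]
      have hK : 64 - 5 * i = (64 - 5 * (i + 1)) + 5 := by omega
      have hlt : symN cs i * 2 ^ (64 - 5 * (i + 1)) < 2 ^ (64 - 5 * i) := by
        rw [hK, pow_add]
        have := symN_lt cs i
        have hp : 0 < 2 ^ (64 - 5 * (i + 1)) := by positivity
        nlinarith
      rw [bor_add X _ _ hlt]
      have hX' : (X * 2 ^ (64 - 5 * i) + symN cs i * 2 ^ (64 - 5 * (i + 1)) : Nat)
          = ((X * 32 + symN cs i) * 2 ^ (64 - 5 * (i + 1)) : Nat) := by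
        rw [hK, pow_add]; ring
      rw [hX']
      rw [show ((((X * 32 + symN cs i) * 2 ^ (64 - 5 * (i + 1)) : Nat)) : Int)
            = (((X * 32 + symN cs i : Nat)) : Int) * 2 ^ (64 - 5 * (i + 1)) from by push_cast; ring]
      rw [ih (i + 1) (X * 32 + symN cs i) (by omega) (by omega)]
      congr 1
      have htail : tailB cs i = symN cs i * 2 ^ (5 * (11 - i)) + tailB cs (i + 1) := by
        rw [tailB, if_pos hi12]
      rw [htail]
      obtain ⟨e, he⟩ : ∃ e, 64 - 5 * (i + 1) = e + 4 := ⟨64 - 5 * (i + 1) - 4, by omega⟩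
      rw [hK, he, show 5 * (11 - i) = e from by omega]
      ring
    · rw [dif_neg hc]
      have ht : tailB cs i = 0 := by
        by_cases hl : cs.length ≤ i
        · exact tailB_stop cs (d + 1) i hl (by omega)
        · have hi : i = 12 := by omega
          subst hi
          rw [tailB, if_neg (by omega)]
      rw [ht]
      push_cast; ring

-- decoding a digit undoes encoding, for every symbol value 0..31
lemma b32val_encN (v : Nat) (hv : v < 32) : b32val (encN v) = (v : Int) := by
  interval_cases v <;> decide

-- B's padded digit list is exactly position-wise encoded symbols
lemma digits_eq (cs : List Char) :
    ((PySem.List.slice cs none (some (12 : Int))).map encDigit)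
      ++ List.replicate (12 - ((PySem.List.slice cs none (some (12 : Int))).map encDigit).length) '0'
    = (List.range 12).map (fun k => encN (symN cs k)) := by
  rw [show ((12 : Int)) = ((12 : Nat) : Int) from rfl, PySem.List.slice_to_natCast]
  apply List.ext_getElem
  · simp
  · intro i h1 h2
    simp only [List.length_append, List.length_map, List.length_take, List.length_replicate] at h1
    have hi12 : i < 12 := by
      simp only [List.length_map, List.length_range] at h2; omega
    simp only [List.getElem_map, List.getElem_range]
    by_cases hlen : i < cs.length
    · have hm : i < ((cs.take 12).map encDigit).length := by
        simp only [List.length_map, List.length_take]; omega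
      rw [List.getElem_append_left hm]
      simp only [List.getElem_map, List.getElem_take]
      unfold encDigit encN
      rw [csymB_eq]
      have hg : PySem.List.pyGetD cs (i : Int) ' ' = cs[i] := by
        simp [PySem.List.pyGetD, PySem.List.pyGet?_natCast, List.getElem?_eq_getElem hlen]
      rw [show (symN cs i : Int) = charToSymbolA cs[i] from by
        rw [symN_cast cs i hlen, hg]]
    · have hm : ((cs.take 12).map encDigit).length ≤ i := by
        simp only [List.length_map, List.length_take]; omega
      rw [List.getElem_append_right hm, List.getElem_replicate]
      have hs : symN cs i = 0 := by unfold symN; rw [if_neg (by omega)]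
      rw [hs]
      rfl

-- invariant of B's Horner parse over the encoded tail
lemma parse_inv (cs : List Char) :
    ∀ (d i X : Nat), 12 ≤ i + d → i ≤ 12 →
      ((List.range' i (12 - i)).map (fun k => encN (symN cs k))).foldl
          (fun a c => a * 32 + b32val c) ((X : Nat) : Int)
        = ((X * 2 ^ (5 * (12 - i)) + tailB cs i : Nat) : Int) := by
  intro d
  induction d with
  | zero =>
    intro i X h h12
    have hi : i = 12 := by omega
    subst hi
    rw [show (12 - 12 : Nat) = 0 from rfl]
    simp only [List.range', List.map_nil, List.foldl_nil]
    rw [tailB, if_neg (by omega)]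
    push_cast; ring
  | succ d ih =>
    intro i X h h12
    by_cases hi12 : i < 12
    · obtain ⟨n, hn⟩ : ∃ n, 12 - i = n + 1 := ⟨12 - i - 1, by omega⟩
      rw [hn, List.range'_succ, List.map_cons, List.foldl_cons]
      rw [b32val_encN (symN cs i) (symN_lt cs i)]
      rw [show ((X : Nat) : Int) * 32 + (symN cs i : Int) = ((X * 32 + symN cs i : Nat) : Int) from by
        push_cast; ring]
      rw [show n = 12 - (i + 1) from by omega]
      rw [ih (i + 1) (X * 32 + symN cs i) (by omega) (by omega)]
      congr 1
      have htail : tailB cs i = symN cs i * 2 ^ (5 * (11 - i)) + tailB cs (i + 1) := by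
        rw [tailB, if_pos hi12]
      rw [htail, show 5 * (12 - (i + 1) + 1) = 5 * (11 - i) + 5 from by omega,
        show 5 * (12 - (i + 1)) = 5 * (11 - i) from by omega, pow_add]
      ring
    · have hi : i = 12 := by omega
      subst hi
      rw [show (12 - 12 : Nat) = 0 from rfl]
      simp only [List.range', List.map_nil, List.foldl_nil]
      rw [tailB, if_neg (by omega)]
      push_cast; ring

-- ===== VERDICT (by name: the statement is the Claim_ definition above) =====
theorem string_to_name_spec : Claim_equal_string_to_name := by
  intro s _
  have hA : stnWhile s.toList 0 0 = ((tailB s.toList 0 * 16 : Nat) : Int) := by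
    have h := stnWhile_eq s.toList 12 0 0 (by omega) (by omega)
    simpa using h
  have hB : parseB32 (((PySem.List.slice s.toList none (some (12 : Int))).map encDigit)
        ++ List.replicate (12 - ((PySem.List.slice s.toList none (some (12 : Int))).map encDigit).length) '0')
      = ((tailB s.toList 0 : Nat) : Int) := by
    rw [digits_eq]
    have h := parse_inv s.toList 12 0 0 (by omega) (by omega)
    rw [show (List.range 12) = List.range' 0 (12 - 0) from by rw [List.range_eq_range']]
    simpa using h
  unfold Spec_string_to_name string_to_name string_to_name_alt
  simp only [hA, hB, csymB_eq]
  split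
  · have hb := band15_bounds (charToSymbolA (PySem.List.pyGetD s.toList (12 : Int) ' '))
      (csym_bounds _).1
    set m := PySem.Int.band (charToSymbolA (PySem.List.pyGetD s.toList (12 : Int) ' ')) 15 with hm
    have hmn : m = ((m.toNat : Nat) : Int) := by
      rw [Int.toNat_of_nonneg hb.1]
    rw [show ((tailB s.toList 0 * 16 : Nat) : Int) = ((tailB s.toList 0 : Nat) : Int) * 2 ^ 4 from by
      push_cast; ring, hmn]
    rw [bor_add (tailB s.toList 0) m.toNat 4 (by omega)]
    push_cast; ring
  · push_cast; ring
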